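-- pv_equiv track=rewrite | github.com/a100475/plneb-2425 | TP1/extract_glossario_de_termos_medicos_tecnicos_e_populares.py | processar_blocks
-- ===== SOURCE A (Python) =====
-- def processar_blocks(blocks):
--     processed_blocks = []
--
--     for block in blocks:
--         if not block.strip():
--             continue
--
--         processed_lines = []
--         lines = block.splitlines()
--         i = 0
--
--         while i < len(lines):
--             current_line = lines[i].strip()
--
--             if i == len(lines) - 1:
--                 processed_lines.append(current_line)
--                 break
--
--             next_line = lines[i + 1].strip()
--
--             # If line não tem "(pop)" && >35 chars
--             if "(pop)" not in current_line and len(current_line) > 35: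
--                 # Add para a proxima linha
--                 lines[i + 1] = current_line + " " + next_line
--                 i += 1
--
--             # If line tem "(pop)" && <35 char
--             elif "(pop)" not in current_line and len(current_line) <= 35 and i > 0:
--                 # Add à linha anterior
--                 processed_lines[-1] = processed_lines[-1] + " " + current_line
--                 i += 1
--             else:
--                 processed_lines.append(current_line)
--                 i += 1
--
--         processed_blocks.append('\n'.join(processed_lines))
--
--     return processed_blocks
-- ===== SOURCE B (Python) =====
-- def _join(carry, raw):
--     s = raw.strip()
--     if not carry:
--         return s
--     if not s:
--         return carry
--     return carry + " " + s
--
--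
-- def _merge_long(lines):
--     # phase 1: fold long no-"(pop)" lines forward into their successor
--     out = []
--     carry = ""
--     for raw in lines[:-1]:
--         line = _join(carry, raw)
--         if "(pop)" not in line and len(line) > 35:
--             carry = line
--         else:
--             out.append(line)
--             carry = ""
--     out.append(_join(carry, lines[-1]))
--     return out
--
--
-- def _attach_short(merged):
--     # phase 2: glue short no-"(pop)" middle lines onto the previous kept line
--     acc = [merged[0]]
--     for line in merged[1:-1]:
--         if "(pop)" not in line and len(line) <= 35:
--             acc[-1] = acc[-1] + " " + line
--         else:
--             acc.append(line)
--     if len(merged) > 1: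
--         acc.append(merged[-1])
--     return acc
--
--
-- def processar_blocks(blocks):
--     result = []
--     for block in blocks:
--         if block.strip():
--             merged = _merge_long(block.splitlines())
--             result.append("\n".join(_attach_short(merged)))
--     return result
-- ===== Notes on version B (the rewrite author's own statement) =====
-- stated objective: alternative
-- what changed: Replaces A's index-based while loop that mutates the lines list in place with two separate non-mutating passes: a fold that merges long '(pop)'-free lines forward into their successor, then a fold that glues short '(pop)'-free middle lines onto the previously kept line.
import Mathlib
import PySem

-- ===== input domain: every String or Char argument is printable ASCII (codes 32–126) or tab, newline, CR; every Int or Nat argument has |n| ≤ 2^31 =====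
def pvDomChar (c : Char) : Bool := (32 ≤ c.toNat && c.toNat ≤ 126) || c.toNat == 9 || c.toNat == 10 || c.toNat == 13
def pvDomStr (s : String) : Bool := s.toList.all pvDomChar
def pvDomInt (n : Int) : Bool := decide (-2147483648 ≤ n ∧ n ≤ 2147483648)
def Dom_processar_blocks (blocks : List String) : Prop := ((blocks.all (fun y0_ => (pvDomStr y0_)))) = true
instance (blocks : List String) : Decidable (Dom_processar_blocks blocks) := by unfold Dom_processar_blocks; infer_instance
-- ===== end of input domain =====

-- B replaces A's index-based while loop that mutates the lines list in place by two separate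
-- non-mutating folds (merge long lines forward, then glue short lines back); same return value.

-- ===== PORT A =====
-- A's while loop reads lines[i], writes lines[i+1] and moves forward; ported as recursion on
-- the suffix of lines starting at i (whose head carries the in-place write); `pos` is `i > 0`.
def pvLoopA (lines : List (List Char)) (processed : List (List Char)) (pos : Bool) :
    List (List Char) :=
  match lines with
  | [] => processed
  | [l] => processed ++ [PySem.Chars.strip l]                      -- i == len(lines) - 1
  | l :: l2 :: rest =>
    let cur := PySem.Chars.strip l
    let nxt := PySem.Chars.strip l2
    if !PySem.Chars.isIn "(pop)".toList cur && decide (35 < cur.length) then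
      pvLoopA ((cur ++ ' ' :: nxt) :: rest) processed true         -- lines[i+1] = cur + " " + nxt
    else if !PySem.Chars.isIn "(pop)".toList cur && decide (cur.length ≤ 35) && pos then
      -- processed_lines[-1] += " " + cur (Python would raise on empty processed; unreachable)
      pvLoopA (l2 :: rest) (processed.dropLast ++ [processed.getLast?.getD [] ++ ' ' :: cur]) true
    else
      pvLoopA (l2 :: rest) (processed ++ [cur]) true
termination_by lines.length
decreasing_by all_goals simp

def processar_blocks (blocks : List String) : List String :=
  blocks.foldl (fun processed_blocks block =>
    if PySem.Chars.strip block.toList = [] then processed_blocks   -- if not block.strip(): continue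
    else processed_blocks ++
      [String.ofList (PySem.Chars.join ['\n']
        (pvLoopA (PySem.Chars.splitlines block.toList) [] false))]) []

-- ===== PORT B =====
-- Source B _join
def pvJoin (carry raw : List Char) : List Char :=
  let s := PySem.Chars.strip raw
  if carry = [] then s
  else if s = [] then carry
  else carry ++ ' ' :: s

-- Source B _merge_long: fold over lines[:-1] with state (out, carry), then flush into lines[-1]
-- (call sites pass a nonempty list, so the [] default of getLast? is never read)
def pvMergeLong (lines : List (List Char)) : List (List Char) :=
  let st := lines.dropLast.foldl (fun (st : List (List Char) × List Char) raw =>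
      let line := pvJoin st.2 raw
      if !PySem.Chars.isIn "(pop)".toList line && decide (35 < line.length) then (st.1, line)
      else (st.1 ++ [line], [])) ([], [])
  st.1 ++ [pvJoin st.2 (lines.getLast?.getD [])]

-- Source B _attach_short: fold over merged[1:-1] starting from [merged[0]], then append merged[-1]
def pvAttachShort (merged : List (List Char)) : List (List Char) :=
  let acc := (merged.drop 1).dropLast.foldl (fun acc line =>
      if !PySem.Chars.isIn "(pop)".toList line && decide (line.length ≤ 35) then
        acc.dropLast ++ [acc.getLast?.getD [] ++ ' ' :: line]
      else acc ++ [line]) [merged.headD []]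
  if 1 < merged.length then acc ++ [merged.getLast?.getD []] else acc

def processar_blocks_alt (blocks : List String) : List String :=
  blocks.foldl (fun result block =>
    if PySem.Chars.strip block.toList ≠ [] then                    -- if block.strip():
      result ++
        [String.ofList (PySem.Chars.join ['\n']
          (pvAttachShort (pvMergeLong (PySem.Chars.splitlines block.toList))))]
    else result) []

-- ===== PRECONDITION & SPEC =====
def Spec_processar_blocks (blocks : List String) (out : List String) : Prop := out = processar_blocks_alt blocks
instance (blocks : List String) (out : List String) : Decidable (Spec_processar_blocks blocks out) := by unfold Spec_processar_blocks; infer_instance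

-- ===== CLAIM (what is proved, stated in full; the proofs are below) =====
def Claim_equal_processar_blocks : Prop := ∀ (blocks : List String), Dom_processar_blocks blocks → Spec_processar_blocks blocks (processar_blocks blocks)

-- ===== LEMMAS AND PROOFS =====

-- `strip` through Mathlib's dropWhile/rdropWhile
lemma pv_strip_eq (s : List Char) :
    PySem.Chars.strip s =
      List.rdropWhile PySem.Chars.isspace (List.dropWhile PySem.Chars.isspace s) := by
  simp [PySem.Chars.strip, PySem.Chars.lstrip, PySem.Chars.rstrip, List.rdropWhile]

-- a list equal to its own strip is left untouched by both one-sided strips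
lemma pv_drops_of_strip_eq {s : List Char} (h : PySem.Chars.strip s = s) :
    List.dropWhile PySem.Chars.isspace s = s ∧ List.rdropWhile PySem.Chars.isspace s = s := by
  rw [pv_strip_eq] at h
  have h1 : List.dropWhile PySem.Chars.isspace s = s := by
    have hsuf := List.dropWhile_suffix (l := s) (p := PySem.Chars.isspace)
    refine hsuf.eq_of_length ?_
    have h2 := (List.rdropWhile_prefix PySem.Chars.isspace
      (List.dropWhile PySem.Chars.isspace s)).length_le
    have h3 := List.length_dropWhile_le (p := PySem.Chars.isspace) (l := s)
    have h4 := congrArg List.length h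
    omega
  exact ⟨h1, by rwa [h1] at h⟩

lemma pv_strip_strip (s : List Char) :
    PySem.Chars.strip (PySem.Chars.strip s) = PySem.Chars.strip s := by
  rw [pv_strip_eq s, pv_strip_eq]
  set p := PySem.Chars.isspace
  set a := List.dropWhile p s with ha
  by_cases hr : List.rdropWhile p a = []
  · simp [hr]
  · have hpre := List.rdropWhile_prefix p a
    have hrl : 0 < (List.rdropWhile p a).length := List.length_pos_iff.mpr hr
    have hal : 0 < a.length := lt_of_lt_of_le hrl hpre.length_le
    have hd : List.dropWhile p (List.rdropWhile p a) = List.rdropWhile p a := by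
      rw [List.dropWhile_eq_self_iff]
      intro hl
      have hga : (List.rdropWhile p a)[0]'hl = a[0]'hal := List.IsPrefix.getElem hpre hl
      rw [hga]
      exact List.dropWhile_get_zero_not p s hal
    rw [hd, List.rdropWhile_idempotent]

-- a nonempty list equal to its own strip has non-space first and last characters
lemma pv_nice_head {s : List Char} (h : PySem.Chars.strip s = s) (hne : s ≠ []) :
    PySem.Chars.isspace (s.headD ' ') = false := by
  obtain ⟨h1, -⟩ := pv_drops_of_strip_eq h
  have := (List.dropWhile_eq_self_iff).1 h1 (by
    cases s with | nil => exact absurd rfl hne | cons x t => simp)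
  cases s with
  | nil => exact absurd rfl hne
  | cons x t => simpa using Bool.eq_false_iff.2 this

lemma pv_nice_last {s : List Char} (h : PySem.Chars.strip s = s) (hne : s ≠ []) :
    PySem.Chars.isspace (s.getLastD ' ') = false := by
  obtain ⟨-, h2⟩ := pv_drops_of_strip_eq h
  have := (List.rdropWhile_eq_self_iff).1 h2 hne
  rw [List.getLastD_eq_getLast?, List.getLast?_eq_some_getLast hne]
  simpa using Bool.eq_false_iff.2 this

lemma pv_nice_of_head_last {s : List Char} (hne : s ≠ [])
    (h1 : PySem.Chars.isspace (s.headD ' ') = false)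
    (h2 : PySem.Chars.isspace (s.getLastD ' ') = false) :
    PySem.Chars.strip s = s := by
  rw [pv_strip_eq]
  have hd : List.dropWhile PySem.Chars.isspace s = s := by
    rw [List.dropWhile_eq_self_iff]
    intro hl
    cases s with
    | nil => exact absurd rfl hne
    | cons x t => simpa using h1
  rw [hd, List.rdropWhile_eq_self_iff]
  intro hl
  rw [List.getLastD_eq_getLast?, List.getLast?_eq_some_getLast hne] at h2
  simpa using h2

-- stripping A's concatenated line "carry + ' ' + strip raw" is Source B's _join
lemma pv_strip_concat {carry : List Char} (raw : List Char)
    (hc : PySem.Chars.strip carry = carry) (hne : carry ≠ []) :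
    PySem.Chars.strip (carry ++ ' ' :: PySem.Chars.strip raw) = pvJoin carry raw := by
  unfold pvJoin
  simp only [if_neg hne]
  by_cases hs : PySem.Chars.strip raw = []
  · rw [hs, if_pos rfl]
    rw [pv_strip_eq]
    have hd : List.dropWhile PySem.Chars.isspace (carry ++ [' ']) = carry ++ [' '] := by
      rw [List.dropWhile_eq_self_iff]
      intro hl
      cases carry with
      | nil => exact absurd rfl hne
      | cons x t =>
        have hx := pv_nice_head hc hne
        simpa using hx
    rw [hd, List.rdropWhile_concat_pos _ _ _ (by decide)]
    exact (pv_drops_of_strip_eq hc).2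
  · rw [if_neg hs]
    apply pv_nice_of_head_last (by simp)
    · cases carry with
      | nil => exact absurd rfl hne
      | cons x t =>
        have hx := pv_nice_head hc hne
        simpa using hx
    · have hlast : (carry ++ ' ' :: PySem.Chars.strip raw).getLastD ' '
          = (PySem.Chars.strip raw).getLastD ' ' := by
        rw [List.getLastD_eq_getLast?, List.getLastD_eq_getLast?,
          List.getLast?_append_of_ne_nil _ (by simp)]
        have hsplit : (' ' :: PySem.Chars.strip raw) = [' '] ++ PySem.Chars.strip raw := rfl
        rw [hsplit, List.getLast?_append_of_ne_nil _ hs]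
      rw [hlast]
      exact pv_nice_last (pv_strip_strip raw) hs

lemma pv_join_nice {carry : List Char} (raw : List Char)
    (hc : PySem.Chars.strip carry = carry) :
    PySem.Chars.strip (pvJoin carry raw) = pvJoin carry raw := by
  by_cases h1 : carry = []
  · simp only [pvJoin, if_pos h1]
    exact pv_strip_strip raw
  · by_cases h2 : PySem.Chars.strip raw = []
    · simp only [pvJoin, if_neg h1, if_pos h2]
      exact hc
    · have h3 := pv_strip_concat raw hc h1
      simp only [pvJoin, if_neg h1, if_neg h2] at h3 ⊢
      rw [← h3, pv_strip_strip]

lemma pv_join_len {carry : List Char} (raw : List Char) :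
    carry ≠ [] → carry.length ≤ (pvJoin carry raw).length := by
  intro hne
  unfold pvJoin
  by_cases h2 : PySem.Chars.strip raw = [] <;> simp [hne, h2]

-- recursion forms of B's two folds
def pvMergeRun (carry : List Char) (lines : List (List Char)) : List (List Char) :=
  match lines with
  | [] => []
  | [last] => [pvJoin carry last]
  | raw :: l2 :: rest =>
    let line := pvJoin carry raw
    if !PySem.Chars.isIn "(pop)".toList line && decide (35 < line.length) then
      pvMergeRun line (l2 :: rest)
    else line :: pvMergeRun [] (l2 :: rest)

def pvGoAttach (acc : List (List Char)) (ms : List (List Char)) : List (List Char) :=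
  match ms with
  | [] => acc
  | [m] => acc ++ [m]
  | m :: m2 :: rest =>
    if !PySem.Chars.isIn "(pop)".toList m && decide (m.length ≤ 35) && !acc.isEmpty then
      pvGoAttach (acc.dropLast ++ [acc.getLast?.getD [] ++ ' ' :: m]) (m2 :: rest)
    else pvGoAttach (acc ++ [m]) (m2 :: rest)

lemma pv_mergeRun_ne_nil (carry : List Char) (lines : List (List Char)) (h : lines ≠ []) :
    pvMergeRun carry lines ≠ [] := by
  induction lines generalizing carry with
  | nil => exact absurd rfl h
  | cons a t ih =>
    cases t with
    | nil => simp [pvMergeRun]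
    | cons b r =>
      simp only [pvMergeRun]
      split
      · exact ih _ (by simp)
      · simp

lemma pv_mergeAux (lines : List (List Char)) (h : lines ≠ []) :
    ∀ (out : List (List Char)) (carry : List Char),
      (let st := lines.dropLast.foldl (fun (st : List (List Char) × List Char) raw =>
          let line := pvJoin st.2 raw
          if !PySem.Chars.isIn "(pop)".toList line && decide (35 < line.length) then (st.1, line)
          else (st.1 ++ [line], [])) (out, carry)
       st.1 ++ [pvJoin st.2 (lines.getLast?.getD [])])
      = out ++ pvMergeRun carry lines := by
  induction lines with
  | nil => exact absurd rfl h
  | cons a t ih =>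
    intro out carry
    cases t with
    | nil => simp [pvMergeRun]
    | cons b r =>
      have hd : (a :: b :: r).dropLast = a :: (b :: r).dropLast := rfl
      simp only [hd, List.foldl_cons, List.getLast?_cons_cons, pvMergeRun]
      by_cases hb1 : (!PySem.Chars.isIn "(pop)".toList (pvJoin carry a)
          && decide (35 < (pvJoin carry a).length)) = true
      · simp only [if_pos hb1]
        exact ih (by simp) out (pvJoin carry a)
      · simp only [if_neg hb1]
        have := ih (by simp) (out ++ [pvJoin carry a]) []
        simpa using this

lemma pv_mergeLong_eq (lines : List (List Char)) (h : lines ≠ []) :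
    pvMergeLong lines = pvMergeRun [] lines := by
  have := pv_mergeAux lines h [] []
  simpa [pvMergeLong] using this

lemma pv_goAttach_foldl (ms : List (List Char)) :
    ∀ (acc : List (List Char)), acc ≠ [] →
      pvGoAttach acc ms =
        if ms = [] then acc
        else (ms.dropLast.foldl (fun acc line =>
            if !PySem.Chars.isIn "(pop)".toList line && decide (line.length ≤ 35) then
              acc.dropLast ++ [acc.getLast?.getD [] ++ ' ' :: line]
            else acc ++ [line]) acc) ++ [ms.getLast?.getD []] := by
  induction ms with
  | nil => intro acc hacc; simp [pvGoAttach]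
  | cons m t ih =>
    intro acc hacc
    cases t with
    | nil => simp [pvGoAttach]
    | cons m2 r =>
      have hne : (!acc.isEmpty) = true := by simp [hacc]
      have hd : (m :: m2 :: r).dropLast = m :: (m2 :: r).dropLast := rfl
      simp only [pvGoAttach, hne, Bool.and_true, hd, List.foldl_cons,
        List.getLast?_cons_cons]
      by_cases hb : (!PySem.Chars.isIn "(pop)".toList m && decide (m.length ≤ 35)) = true
      · simp only [if_pos hb]
        rw [ih _ (by simp)]
        simp
      · simp only [if_neg hb]
        rw [ih _ (by simp)]
        simp

lemma pv_attachShort_eq (merged : List (List Char)) (h : merged ≠ []) :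
    pvAttachShort merged = pvGoAttach [] merged := by
  cases merged with
  | nil => exact absurd rfl h
  | cons m0 ms =>
    cases ms with
    | nil => simp [pvAttachShort, pvGoAttach]
    | cons m1 r =>
      have h1 : pvGoAttach [] (m0 :: m1 :: r) = pvGoAttach [m0] (m1 :: r) := by
        simp [pvGoAttach]
      rw [h1, pv_goAttach_foldl _ _ (by simp)]
      simp [pvAttachShort]

-- the head of A's lines list at index i, with the pending in-place write embedded
def pvEmbed (carry : List Char) (lines : List (List Char)) : List (List Char) :=
  match lines with
  | [] => []
  | l :: rest => (if carry = [] then l else carry ++ ' ' :: PySem.Chars.strip l) :: rest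

-- MAIN INVARIANT: A's single mutating loop equals B's two folds composed
lemma pv_main (lines : List (List Char)) (hlines : lines ≠ [])
    (acc : List (List Char)) (carry : List Char) (pos : Bool)
    (hc : PySem.Chars.strip carry = carry)
    (hlen : carry ≠ [] → 35 < carry.length)
    (hpos : pos = false → carry = [] ∧ acc = [])
    (hacc : pos = true → carry = [] → acc ≠ []) :
    pvLoopA (pvEmbed carry lines) acc pos = pvGoAttach acc (pvMergeRun carry lines) := by
  induction lines generalizing acc carry pos with
  | nil => exact absurd rfl hlines
  | cons l tail ih =>
    have hcur : PySem.Chars.strip (if carry = [] then l else carry ++ ' ' :: PySem.Chars.strip l)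
        = pvJoin carry l := by
      by_cases hcE : carry = []
      · simp [hcE, pvJoin]
      · rw [if_neg hcE]; exact pv_strip_concat l hc hcE
    cases tail with
    | nil =>
      simp only [pvEmbed, pvLoopA, pvMergeRun, pvGoAttach, hcur]
    | cons l2 rest =>
      simp only [pvEmbed, pvLoopA, pvMergeRun, hcur]
      by_cases hb1 : (!PySem.Chars.isIn "(pop)".toList (pvJoin carry l)
          && decide (35 < (pvJoin carry l).length)) = true
      · rw [if_pos hb1, if_pos hb1]
        have hlen1 : 35 < (pvJoin carry l).length := by
          simp only [Bool.and_eq_true, decide_eq_true_eq] at hb1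
          exact hb1.2
        have hne1 : pvJoin carry l ≠ [] := by
          intro h0; rw [h0] at hlen1; simp at hlen1
        have hE : (pvJoin carry l ++ ' ' :: PySem.Chars.strip l2) :: rest
            = pvEmbed (pvJoin carry l) (l2 :: rest) := by
          simp [pvEmbed, hne1]
        rw [hE]
        exact ih (by simp) acc (pvJoin carry l) true (pv_join_nice l hc)
          (fun _ => hlen1) (by simp) (fun _ h0 => absurd h0 hne1)
      · rw [if_neg hb1, if_neg hb1]
        have hM := pv_mergeRun_ne_nil [] (l2 :: rest) (by simp)
        obtain ⟨m2, M', hMeq⟩ := List.exists_cons_of_ne_nil hM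
        rw [hMeq, pvGoAttach]
        by_cases hb2 : (!PySem.Chars.isIn "(pop)".toList (pvJoin carry l)
            && decide ((pvJoin carry l).length ≤ 35) && pos) = true
        · have hb2' := hb2
          simp only [Bool.and_eq_true, decide_eq_true_eq] at hb2'
          have hcE : carry = [] := by
            by_contra hc0
            have h35 := hlen hc0
            have hle := pv_join_len l hc0
            omega
          have haccne : acc ≠ [] := hacc hb2'.2 hcE
          have hEmp : (!acc.isEmpty) = true := by
            cases acc with
            | nil => exact absurd rfl haccne
            | cons x xs => rfl
          rw [if_pos hb2]
          rw [if_pos (by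
            simp only [Bool.and_eq_true, decide_eq_true_eq] at hEmp ⊢
            exact ⟨hb2'.1, hEmp⟩)]
          rw [← hMeq]
          have hEm : (l2 :: rest) = pvEmbed [] (l2 :: rest) := by simp [pvEmbed]
          rw [hEm]
          exact ih (by simp) _ [] true rfl (fun h0 => absurd rfl h0) (by simp)
            (fun _ _ => by simp)
        · rw [if_neg hb2]
          have hcond : ¬((!PySem.Chars.isIn "(pop)".toList (pvJoin carry l)
              && decide ((pvJoin carry l).length ≤ 35) && !acc.isEmpty) = true) := by
            intro h0
            simp only [Bool.and_eq_true, decide_eq_true_eq] at h0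
            have hposf : pos = false := by
              cases hp : pos
              · rfl
              · exfalso
                apply hb2
                simp only [Bool.and_eq_true, decide_eq_true_eq]
                exact ⟨h0.1, hp⟩
            obtain ⟨-, haccnil⟩ := hpos hposf
            rw [haccnil] at h0
            simpa using h0.2
          rw [if_neg hcond, ← hMeq]
          have hEm : (l2 :: rest) = pvEmbed [] (l2 :: rest) := by simp [pvEmbed]
          rw [hEm]
          exact ih (by simp) _ [] true rfl (fun h0 => absurd rfl h0) (by simp)
            (fun _ _ => by simp)

lemma pv_block_eq (lines : List (List Char)) :
    PySem.Chars.join ['\n'] (pvLoopA lines [] false) =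
      PySem.Chars.join ['\n'] (pvAttachShort (pvMergeLong lines)) := by
  cases hl : lines with
  | nil =>
    simp only [pvLoopA]
    have : pvAttachShort (pvMergeLong []) = [[]] := by
      simp [pvMergeLong, pvAttachShort, pvJoin, PySem.Chars.strip,
        PySem.Chars.lstrip, PySem.Chars.rstrip]
    rw [this]
    rfl
  | cons a t =>
    have hne : lines ≠ [] := by rw [hl]; simp
    rw [← hl]
    rw [pv_mergeLong_eq lines hne,
      pv_attachShort_eq _ (pv_mergeRun_ne_nil [] lines hne)]
    have hEm : lines = pvEmbed [] lines := by
      rw [hl]; simp [pvEmbed]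
    have hmain := pv_main lines hne [] [] false rfl (fun h0 => absurd rfl h0)
      (fun _ => ⟨rfl, rfl⟩) (fun h0 => by simp at h0)
    rw [← hEm] at hmain
    rw [hmain]

lemma pv_entry_eq (blocks : List String) :
    processar_blocks blocks = processar_blocks_alt blocks := by
  unfold processar_blocks processar_blocks_alt
  induction blocks using List.reverseRecOn with
  | nil => rfl
  | append_singleton bs b ih =>
    rw [List.foldl_append, List.foldl_append, ← ih]
    simp only [List.foldl]
    by_cases hb : PySem.Chars.strip b.toList = []
    · simp [hb]
    · simp [hb, pv_block_eq]

-- ===== VERDICT (by name: the statement is the Claim_ definition above) =====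
theorem processar_blocks_spec : Claim_equal_processar_blocks := by
  intro blocks _
  show processar_blocks blocks = processar_blocks_alt blocks
  exact pv_entry_eq blocks
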